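-- pv_equiv track=rewrite | github.com/kyle-98/AdventOfCode | 2023/day1/part2.py | replace_stupid_nums
-- ===== SOURCE A (Python) =====
-- def replace_stupid_nums(s):
--     nd = {
--         'one': '1',
--         'two': '2',
--         'three': '3',
--         'four': '4',
--         'five': '5',
--         'six': '6',
--         'seven': '7',
--         'eight': '8',
--         'nine': '9'
--     }
--     td = {}
--     for num in nd:
--         if s.find(num) != -1:
--             td.update({num: s.find(num)})
--
--     l = sorted(td.items(), key=lambda x:x[1])
--     try:
--         s = s.replace(l[0][0], nd[l[0][0]])
--     except:
--         pass
--     try: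
--         s = s.replace(l[-1][0], nd[l[-1][0]])
--     except:
--         pass
--     return s
-- ===== SOURCE B (Python) =====
-- def replace_stupid_nums(s):
--     nd = {'one': '1', 'two': '2', 'three': '3', 'four': '4', 'five': '5',
--           'six': '6', 'seven': '7', 'eight': '8', 'nine': '9'}
--     first = None
--     last = None
--     for w, d in nd.items():
--         i = s.find(w)
--         if i == -1:
--             continue
--         if first is None or i < first[2]:
--             first = (w, d, i)
--         if last is None or i >= last[2]:
--             last = (w, d, i)
--     if first is None:
--         return s
--     s = s.replace(first[0], first[1])
--     return s.replace(last[0], last[1])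
-- ===== Notes on version B (the rewrite author's own statement) =====
-- stated objective: simpler
-- what changed: B replaces A's build-a-dict / sort-its-items / index-[0]-and-[-1] pipeline (with try/except for the empty case) by a single tracking pass over the nine words that keeps the (word, digit, index) with the minimal and the maximal first-occurrence index and then does the two replaces.
import Mathlib
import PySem

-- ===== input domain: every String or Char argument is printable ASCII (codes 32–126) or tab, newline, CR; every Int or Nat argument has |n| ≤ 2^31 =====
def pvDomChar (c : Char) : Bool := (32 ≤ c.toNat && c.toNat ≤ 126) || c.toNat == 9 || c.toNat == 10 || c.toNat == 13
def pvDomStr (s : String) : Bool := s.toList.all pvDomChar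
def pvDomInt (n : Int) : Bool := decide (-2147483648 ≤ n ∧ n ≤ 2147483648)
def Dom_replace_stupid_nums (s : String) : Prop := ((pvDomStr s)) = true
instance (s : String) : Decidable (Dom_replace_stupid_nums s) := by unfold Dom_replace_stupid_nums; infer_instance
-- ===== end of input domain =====

-- B replaces A's dict-building + sort + indexing by a single pass over the nine words
-- tracking the (word, digit, index) with the minimal and the maximal first-occurrence
-- index; same return value (simpler, no asymptotic claim).

-- ===== PORT A =====
-- the literal dict nd (shared data constant)
def pvNd : PySem.Dict String String :=
  PySem.Dict.ofList [("one","1"),("two","2"),("three","3"),("four","4"),("five","5"),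
                     ("six","6"),("seven","7"),("eight","8"),("nine","9")]

-- the body of A's 'for num in nd' loop
def pvAStep (s : String) (td : PySem.Dict String Int) (num : String) : PySem.Dict String Int :=
  if PySem.Str.find s num ≠ -1 then td.insert num (PySem.Str.find s num) else td

def replace_stupid_nums (s : String) : String :=
  let td := pvNd.keys.foldl (pvAStep s) PySem.Dict.empty
  let l := PySem.List.sorted td.items (fun x => x.2) false
  -- try: s = s.replace(l[0][0], nd[l[0][0]])  except: pass   (IndexError/KeyError → s unchanged)
  let s1 := match PySem.List.pyGet? l 0 with
    | some p => match pvNd.get? p.1 with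
      | some v => PySem.Str.replace s p.1 v
      | none => s
    | none => s
  -- try: s = s.replace(l[-1][0], nd[l[-1][0]])  except: pass
  match PySem.List.pyGet? l (-1) with
  | some p => match pvNd.get? p.1 with
    | some v => PySem.Str.replace s1 p.1 v
    | none => s1
  | none => s1

-- ===== PORT B =====
-- 'if first is None or i < first[2]: first = (w, d, i)'
def pvMin (a : Option (String × String × Int)) (t : String × String × Int) :
    Option (String × String × Int) :=
  match a with
  | none => some t
  | some f => if t.2.2 < f.2.2 then some t else some f

-- 'if last is None or i >= last[2]: last = (w, d, i)'
def pvMax (a : Option (String × String × Int)) (t : String × String × Int) :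
    Option (String × String × Int) :=
  match a with
  | none => some t
  | some g => if g.2.2 ≤ t.2.2 then some t else some g

-- one iteration of B's 'for w, d in nd.items()' loop
def pvBStep (s : String)
    (st : Option (String × String × Int) × Option (String × String × Int))
    (wd : String × String) :
    Option (String × String × Int) × Option (String × String × Int) :=
  let i := PySem.Str.find s wd.1
  if i = -1 then st
  else (pvMin st.1 (wd.1, wd.2, i), pvMax st.2 (wd.1, wd.2, i))

def replace_stupid_nums_alt (s : String) : String :=
  match pvNd.items.foldl (pvBStep s) (none, none) with
  | (some f, some g) => PySem.Str.replace (PySem.Str.replace s f.1 f.2.1) g.1 g.2.1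
  | _ => s

-- ===== PRECONDITION & SPEC =====
def Spec_replace_stupid_nums (s : String) (out : String) : Prop := out = replace_stupid_nums_alt s
instance (s : String) (out : String) : Decidable (Spec_replace_stupid_nums s out) := by unfold Spec_replace_stupid_nums; infer_instance

-- ===== CLAIM (what is proved, stated in full; the proofs are below) =====
def Claim_equal_replace_stupid_nums : Prop := ∀ (s : String), Dom_replace_stupid_nums s → Spec_replace_stupid_nums s (replace_stupid_nums s)

-- ===== LEMMAS AND PROOFS =====

-- the found words as (word, digit, first-index) triples, in dict order
def pvFound (s : String) : List (String × String × Int) :=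
  (pvNd.items.filter (fun p => PySem.Str.find s p.1 ≠ -1)).map
    (fun p => (p.1, p.2, PySem.Str.find s p.1))

-- the same as (word, first-index) pairs = what A's td.items is
def pvPairs (s : String) : List (String × Int) :=
  (pvFound s).map (fun t => (t.1, t.2.2))

-- ---- A side: td.items = pvPairs s ----
lemma pvAfold_items (s : String) (ws : List String) (d : PySem.Dict String Int)
    (hfresh : ∀ w ∈ ws, d.contains w = false) (hnd : ws.Nodup) :
    (ws.foldl (pvAStep s) d).items
      = d.items ++ (ws.filter (fun w => PySem.Str.find s w ≠ -1)).map
          (fun w => (w, PySem.Str.find s w)) := by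
  induction ws generalizing d with
  | nil => simp
  | cons w ws ih =>
    simp only [List.foldl_cons, List.filter_cons]
    rcases List.nodup_cons.mp hnd with ⟨hw, hnd'⟩
    by_cases hf : PySem.Str.find s w ≠ -1
    · rw [pvAStep, if_pos hf, ih _ ?_ hnd']
      · rw [PySem.Dict.items_insert_of_not_contains d _ (hfresh w (by simp))]
        have hf' : PySem.Chars.find s.toList w.toList ≠ -1 := by simpa using hf
        simp [hf']
      · intro v hv
        rw [PySem.Dict.contains_insert]
        have : v ≠ w := fun h => hw (h ▸ hv)
        simp [this, hfresh v (by simp [hv])]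
    · rw [pvAStep, if_neg hf, ih d (fun v hv => hfresh v (by simp [hv])) hnd']
      simp at hf
      simp [hf]

lemma pvPairs_eq (s : String) :
    pvPairs s = (pvNd.keys.filter (fun w => PySem.Str.find s w ≠ -1)).map
      (fun w => (w, PySem.Str.find s w)) := by
  simp only [pvPairs, pvFound, PySem.Dict.keys, List.map_map, List.filter_map]
  rfl

lemma pvTd_items (s : String) :
    (pvNd.keys.foldl (pvAStep s) PySem.Dict.empty).items = pvPairs s := by
  rw [pvAfold_items s _ _ (fun w _ => PySem.Dict.contains_empty w) (by decide), pvPairs_eq]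
  simp [PySem.Dict.empty]

-- ---- B side: the fold computes min/max folds over pvFound s ----
lemma pvBfold (s : String) (ps : List (String × String)) (a b : Option (String × String × Int)) :
    ps.foldl (pvBStep s) (a, b)
      = (((ps.filter (fun p => PySem.Str.find s p.1 ≠ -1)).map
            (fun p => (p.1, p.2, PySem.Str.find s p.1))).foldl pvMin a,
         ((ps.filter (fun p => PySem.Str.find s p.1 ≠ -1)).map
            (fun p => (p.1, p.2, PySem.Str.find s p.1))).foldl pvMax b) := by
  induction ps generalizing a b with
  | nil => simp
  | cons p ps ih =>
    simp only [List.foldl_cons, List.filter_cons]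
    by_cases hf : PySem.Str.find s p.1 = -1
    · have hf' : PySem.Chars.find s.toList p.1.toList = -1 := by simpa using hf
      rw [pvBStep]; simp [hf', ih]
    · have hf' : ¬ PySem.Chars.find s.toList p.1.toList = -1 := by simpa using hf
      rw [pvBStep]; simp [hf', ih]

lemma pvMin_fold_some (xs : List (String × String × Int)) (x : String × String × Int) :
    ∃ f, xs.foldl pvMin (some x) = some f ∧ (f = x ∨ f ∈ xs) ∧ f.2.2 ≤ x.2.2 ∧
      ∀ t ∈ xs, f.2.2 ≤ t.2.2 := by
  induction xs generalizing x with
  | nil => exact ⟨x, by simp⟩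
  | cons t xs ih =>
    simp only [List.foldl_cons]
    rw [pvMin]
    by_cases h : t.2.2 < x.2.2
    · rw [if_pos h]
      obtain ⟨f, h1, h2, h3, h4⟩ := ih t
      exact ⟨f, h1, by simp only [List.mem_cons]; tauto, by omega, by
        intro u hu
        rcases List.mem_cons.mp hu with rfl | hu'
        · exact h3
        · exact h4 u hu'⟩
    · rw [if_neg h]
      obtain ⟨f, h1, h2, h3, h4⟩ := ih x
      exact ⟨f, h1, by simp only [List.mem_cons]; tauto, h3, by
        intro u hu
        rcases List.mem_cons.mp hu with rfl | hu'
        · omega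
        · exact h4 u hu'⟩

lemma pvMax_fold_some (xs : List (String × String × Int)) (x : String × String × Int) :
    ∃ g, xs.foldl pvMax (some x) = some g ∧ (g = x ∨ g ∈ xs) ∧ x.2.2 ≤ g.2.2 ∧
      ∀ t ∈ xs, t.2.2 ≤ g.2.2 := by
  induction xs generalizing x with
  | nil => exact ⟨x, by simp⟩
  | cons t xs ih =>
    simp only [List.foldl_cons]
    rw [pvMax]
    by_cases h : x.2.2 ≤ t.2.2
    · rw [if_pos h]
      obtain ⟨g, h1, h2, h3, h4⟩ := ih t
      exact ⟨g, h1, by simp only [List.mem_cons]; tauto, by omega, by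
        intro u hu
        rcases List.mem_cons.mp hu with rfl | hu'
        · omega
        · exact h4 u hu'⟩
    · rw [if_neg h]
      obtain ⟨g, h1, h2, h3, h4⟩ := ih x
      exact ⟨g, h1, by simp only [List.mem_cons]; tauto, h3, by
        intro u hu
        rcases List.mem_cons.mp hu with rfl | hu'
        · omega
        · exact h4 u hu'⟩

-- ---- distinctness of the first-occurrence indices ----
-- none of the nine words is a prefix of another
lemma pvNoPrefix : ∀ p ∈ pvNd.items, ∀ q ∈ pvNd.items, p.1 ≠ q.1 →
    ¬ p.1.toList <+: q.1.toList := by decide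

lemma pvFind_inj (s : String) : ∀ a ∈ pvFound s, ∀ b ∈ pvFound s, a.2.2 = b.2.2 → a = b := by
  intro a ha b hb heq
  simp only [pvFound, List.mem_map, List.mem_filter] at ha hb
  obtain ⟨p, ⟨hp, hfp⟩, rfl⟩ := ha
  obtain ⟨q, ⟨hq, hfq⟩, rfl⟩ := hb
  by_cases hpq : p = q
  · subst hpq; rfl
  · exfalso
    have hne : p.1 ≠ q.1 := fun h =>
      hpq (List.inj_on_of_nodup_map (f := Prod.fst) (by decide) hp hq h)
    simp only at heq
    have h0p : 0 ≤ PySem.Chars.find s.toList p.1.toList := by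
      have h1 : PySem.Chars.find s.toList p.1.toList ≠ -1 := by simpa using hfp
      have := PySem.Chars.neg_one_le_find s.toList p.1.toList; omega
    have h0q : 0 ≤ PySem.Chars.find s.toList q.1.toList := by
      have h1 : PySem.Chars.find s.toList q.1.toList ≠ -1 := by simpa using hfq
      have := PySem.Chars.neg_one_le_find s.toList q.1.toList; omega
    obtain ⟨hpre1, -⟩ := PySem.Chars.find_spec h0p
    obtain ⟨hpre2, -⟩ := PySem.Chars.find_spec h0q
    have heq' : PySem.Chars.find s.toList p.1.toList = PySem.Chars.find s.toList q.1.toList := by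
      simpa using heq
    rw [heq'] at hpre1
    rcases List.prefix_or_prefix_of_prefix hpre1 hpre2 with h | h
    · exact pvNoPrefix p hp q hq hne h
    · exact pvNoPrefix q hq p hp hne.symm h

-- ---- last element of a Pairwise-ordered list is maximal ----
lemma pvPairwise_getLast {α : Type} (R : α → α → Prop) (l : List α) (h : l.Pairwise R)
    (hne : l ≠ []) : ∀ y ∈ l, y = l.getLast hne ∨ R y (l.getLast hne) := by
  induction l with
  | nil => simp at hne
  | cons a l ih =>
    rcases List.pairwise_cons.mp h with ⟨ha, hl⟩
    intro y hy
    by_cases hl0 : l = []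
    · subst hl0; simp at hy; subst hy; left; simp [List.getLast]
    · rw [List.getLast_cons hl0]
      rcases List.mem_cons.mp hy with rfl | hy'
      · right; exact ha _ (List.getLast_mem hl0)
      · exact ih hl hl0 y hy'

-- ---- lookup of a found word in nd ----
lemma pvNd_lookup : ∀ p ∈ pvNd.items, pvNd.get? p.1 = some p.2 := by decide

lemma pvFound_lookup (s : String) : ∀ t ∈ pvFound s, pvNd.get? t.1 = some t.2.1 := by
  intro t ht
  simp only [pvFound, List.mem_map, List.mem_filter] at ht
  obtain ⟨p, ⟨hp, -⟩, rfl⟩ := ht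
  exact pvNd_lookup p hp

lemma pvGetLast (l : List (String × Int)) (h : l ≠ []) :
    PySem.List.pyGet? l (-1) = some (l.getLast h) := by
  have hl : 1 ≤ l.length := List.length_pos_iff.mpr h
  simp [PySem.List.pyGet?, PySem.List.pyIdx?, if_pos hl]
  rw [List.getLast_eq_getElem]
  exact List.getElem?_eq_getElem (by omega)

-- ===== VERDICT (by name: the statement is the Claim_ definition above) =====
theorem replace_stupid_nums_spec : Claim_equal_replace_stupid_nums := by
  unfold Claim_equal_replace_stupid_nums
  intro s _
  unfold Spec_replace_stupid_nums replace_stupid_nums replace_stupid_nums_alt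
  simp only [pvTd_items,
    show pvNd.items.foldl (pvBStep s) (none, none)
      = ((pvFound s).foldl pvMin none, (pvFound s).foldl pvMax none) from
      pvBfold s pvNd.items none none]
  by_cases htnil : pvFound s = []
  · have hp : pvPairs s = [] := by simp [pvPairs, htnil]
    rw [hp, htnil]
    simp [PySem.List.sorted, PySem.List.pyGet?, PySem.List.pyIdx?]
  · obtain ⟨t, ts, htnd⟩ := List.exists_cons_of_ne_nil htnil
    -- B-side extremes
    obtain ⟨f, hf1, hf2, hf3, hf4⟩ := pvMin_fold_some ts t
    obtain ⟨g, hg1, hg2, hg3, hg4⟩ := pvMax_fold_some ts t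
    have hfmem : f ∈ pvFound s := by
      rw [htnd]; rcases hf2 with rfl | h
      · simp
      · simp [h]
    have hgmem : g ∈ pvFound s := by
      rw [htnd]; rcases hg2 with rfl | h
      · simp
      · simp [h]
    have hfmin : ∀ u ∈ pvFound s, f.2.2 ≤ u.2.2 := by
      rw [htnd]; intro u hu
      rcases List.mem_cons.mp hu with rfl | hu'
      · exact hf3
      · exact hf4 u hu'
    have hgmax : ∀ u ∈ pvFound s, u.2.2 ≤ g.2.2 := by
      rw [htnd]; intro u hu
      rcases List.mem_cons.mp hu with rfl | hu'
      · exact hg3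
      · exact hg4 u hu'
    have hB1 : (pvFound s).foldl pvMin none = some f := by rw [htnd]; simpa [pvMin] using hf1
    have hB2 : (pvFound s).foldl pvMax none = some g := by rw [htnd]; simpa [pvMax] using hg1
    rw [hB1, hB2]
    -- A-side: the sorted list is nonempty
    have hpne : pvPairs s ≠ [] := by simp [pvPairs, htnd]
    cases hl : PySem.List.sorted (pvPairs s) (fun x => x.2) false with
    | nil => exact absurd ((PySem.List.sorted_eq_nil_iff _ _ _).mp hl) hpne
    | cons m rest =>
      -- head m is the min pair
      have hmmin : ∀ y ∈ pvPairs s, m.2 ≤ y.2 := PySem.List.key_head_sorted_le _ _ hl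
      have hmmem : m ∈ pvPairs s := by
        rw [← PySem.List.mem_sorted (pvPairs s) (fun x => x.2) false, hl]; simp
      obtain ⟨tm, htm, hπm⟩ := List.mem_map.mp hmmem
      have hmf : m = (f.1, f.2.2) := by
        have hm2 : m.2 = tm.2.2 := by rw [← hπm]
        have h1 : m.2 ≤ f.2.2 := by
          have := hmmin (f.1, f.2.2) (List.mem_map.mpr ⟨f, hfmem, rfl⟩); simpa using this
        have h2 : f.2.2 ≤ tm.2.2 := hfmin tm htm
        have : tm = f := pvFind_inj s tm htm f hfmem (by omega)
        rw [← hπm, this]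
      -- last element is the max pair
      have hlne : (m :: rest) ≠ ([] : List (String × Int)) := List.cons_ne_nil m rest
      have hPW : (m :: rest).Pairwise (fun a b : String × Int => a.2 ≤ b.2) := by
        have := PySem.List.sorted_pairwise (pvPairs s) (fun x : String × Int => x.2)
        rwa [hl] at this
      have hlast : ∀ y ∈ m :: rest, y.2 ≤ ((m :: rest).getLast hlne).2 := by
        intro y hy
        rcases pvPairwise_getLast _ _ hPW hlne y hy with rfl | hle
        · exact le_refl _
        · exact hle
      have hlmem : (m :: rest).getLast hlne ∈ pvPairs s := by
        rw [← PySem.List.mem_sorted (pvPairs s) (fun x => x.2) false, hl]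
        exact List.getLast_mem hlne
      obtain ⟨tl, htl, hπl⟩ := List.mem_map.mp hlmem
      have hlg : (m :: rest).getLast hlne = (g.1, g.2.2) := by
        have hl2 : ((m :: rest).getLast hlne).2 = tl.2.2 := by rw [← hπl]
        have h1 : g.2.2 ≤ ((m :: rest).getLast hlne).2 := by
          have := hlast (g.1, g.2.2) (by
            rw [← hl, PySem.List.mem_sorted]
            exact List.mem_map.mpr ⟨g, hgmem, rfl⟩)
          simpa using this
        have h2 : tl.2.2 ≤ g.2.2 := hgmax tl htl
        have : tl = g := pvFind_inj s tl htl g hgmem (by omega)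
        rw [← hπl, this]
      -- evaluate the two indexings and the dict lookups
      rw [show PySem.List.pyGet? (m :: rest) 0 = some m by
            simp [PySem.List.pyGet?, PySem.List.pyIdx?],
          pvGetLast (m :: rest) hlne, hlg, hmf]
      simp [pvFound_lookup s f hfmem, pvFound_lookup s g hgmem]
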